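-- pv_equiv track=rewrite | github.com/BrendanBarber/senate-model | chamber_map.py | _distribute_rows
-- ===== SOURCE A (Python) =====
-- def _distribute_rows(n: int, n_rows: int) -> list[int]:
--     weights = [i + 1 for i in range(n_rows)]
--     total_w = sum(weights)
--     counts = [max(1, round(w / total_w * n)) for w in weights]
--     diff = n - sum(counts)
--     for i in range(abs(diff)):
--         counts[-(i % n_rows) - 1] += 1 if diff > 0 else -1
--     return counts
-- ===== SOURCE B (Python) =====
-- def _distribute_rows(n: int, n_rows: int) -> list[int]:
--     total_w = n_rows * (n_rows + 1) // 2
--     counts = [max(1, round(w / total_w * n)) for w in range(1, n_rows + 1)]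
--     diff = n - sum(counts)
--     q, r = divmod(abs(diff), n_rows)
--     step = 1 if diff > 0 else -1
--     return [c + (q + (n_rows - 1 - j < r)) * step for j, c in enumerate(counts)]
-- ===== Notes on version B (the rewrite author's own statement) =====
-- stated objective: alternative
-- what changed: The per-step correction loop (abs(diff) single increments walking cyclically from the last row) is replaced by a closed-form divmod: each row gets its whole correction (q + (p < r)) * step in one comprehension pass over the rows, and the in-place mutation is gone.
-- outside the precondition, e.g. on _distribute_rows(0, 0): A returns [], B raises ZeroDivisionError; on _distribute_rows(7, 0): A raises ZeroDivisionError, B raises ZeroDivisionError; on _distribute_rows(0, -2): A returns [], B returns []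
import Mathlib
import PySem

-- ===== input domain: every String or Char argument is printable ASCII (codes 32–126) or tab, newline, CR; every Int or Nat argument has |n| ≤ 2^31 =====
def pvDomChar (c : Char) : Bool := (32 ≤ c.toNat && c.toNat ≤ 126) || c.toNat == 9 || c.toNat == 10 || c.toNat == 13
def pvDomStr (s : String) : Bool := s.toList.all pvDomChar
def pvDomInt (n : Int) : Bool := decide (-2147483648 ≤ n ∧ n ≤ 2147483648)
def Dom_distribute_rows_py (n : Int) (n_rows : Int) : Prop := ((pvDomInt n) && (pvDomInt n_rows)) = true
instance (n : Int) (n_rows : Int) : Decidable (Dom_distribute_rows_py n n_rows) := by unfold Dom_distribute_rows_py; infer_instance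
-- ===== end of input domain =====

-- B replaces A's one-increment-at-a-time correction loop (abs(diff) iterations) by a closed-form
-- divmod correction applied in one comprehension pass over the rows (no in-place mutation).

-- ===== shared float model (used by BOTH ports for the common subexpression round(w / total_w * n)) =====
-- Round-half-to-even of an exact rational (= Python round() on a float whose exact value is q).
def pvRnEven (q : ℚ) : Int :=
  let f : Int := q.num / q.den
  let rem : ℚ := q - (f : ℚ)
  if rem < 1/2 then f
  else if (1/2 : ℚ) < rem then f + 1
  else if f % 2 = 0 then f else f + 1

def pvPow2 (e : Int) : ℚ := if 0 ≤ e then (2:ℚ)^e.toNat else 1 / (2:ℚ)^(-e).toNat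

-- Round an exact rational to the nearest IEEE-754 binary64 value (round-to-nearest-even,
-- 53-bit significand).  Exact for the magnitudes reachable here (no overflow, no subnormals).
def pvRoundDouble (q : ℚ) : ℚ :=
  if q = 0 then 0 else
  let a : ℚ := |q|
  let e0 : Int := (Nat.log2 a.num.natAbs : Int) - (Nat.log2 a.den : Int)
  let e1 : Int := if a < pvPow2 e0 then e0 - 1 else e0
  let e  : Int := if pvPow2 (e1+1) ≤ a then e1 + 1 else e1   -- now 2^e ≤ a < 2^(e+1)
  let m  : Int := pvRnEven (a * pvPow2 (52 - e))
  (if 0 < q then (m : ℚ) else (-m : ℚ)) * pvPow2 (e - 52)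

-- Model of the Python expression round(w / total_w * n): correctly-rounded true division,
-- correctly-rounded multiplication by the (exactly representable) n, then banker's rounding.
def pvPyRound (w t n : Int) : Int :=
  pvRnEven (pvRoundDouble (pvRoundDouble ((w:ℚ) / (t:ℚ)) * (n:ℚ)))

-- ===== PORT A =====
def distribute_rows_py (n : Int) (n_rows : Int) : List Int :=
  let weights := (PySem.List.pyRange 0 n_rows 1).map (fun i => i + 1)
  let total_w := weights.sum
  let counts := weights.map (fun w => max 1 (pvPyRound w total_w n))
  let diff := n - counts.sum
  (PySem.List.pyRange 0 |diff| 1).foldl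
    (fun c i =>
      PySem.List.pySetD c (-(PySem.Int.mod i n_rows) - 1)
        (PySem.List.pyGetD c (-(PySem.Int.mod i n_rows) - 1) 0 + (if diff > 0 then 1 else -1)))
    counts

-- ===== PORT B =====
def distribute_rows_py_alt (n : Int) (n_rows : Int) : List Int :=
  let total_w := PySem.Int.floordiv (n_rows * (n_rows + 1)) 2
  let counts := (PySem.List.pyRange 1 (n_rows + 1) 1).map (fun w => max 1 (pvPyRound w total_w n))
  let diff := n - counts.sum
  let q := PySem.Int.floordiv |diff| n_rows
  let r := PySem.Int.mod |diff| n_rows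
  let step : Int := if diff > 0 then 1 else -1
  (PySem.List.enumerate counts 0).map (fun jc => jc.2 + (q + (if n_rows - 1 - jc.1 < r then 1 else 0)) * step)

-- ===== PRECONDITION & SPEC =====
-- Pre_ excludes n_rows ≤ 0: there A raises for every n ≠ 0 (ZeroDivisionError on i % 0 when
-- n_rows = 0, IndexError on the empty counts list when n_rows < 0), and only returns the
-- degenerate [] at n = 0; B's divmod(abs(diff), n_rows) raises at n_rows = 0.
def Pre_distribute_rows_py (n : Int) (n_rows : Int) : Prop := 1 ≤ n_rows
instance (n : Int) (n_rows : Int) : Decidable (Pre_distribute_rows_py n n_rows) := by unfold Pre_distribute_rows_py; infer_instance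

def pvWitness_distribute_rows_py : Int × Int := (10, 3)

def Spec_distribute_rows_py (n : Int) (n_rows : Int) (out : List Int) : Prop := out = distribute_rows_py_alt n n_rows
instance (n : Int) (n_rows : Int) (out : List Int) : Decidable (Spec_distribute_rows_py n n_rows out) := by unfold Spec_distribute_rows_py; infer_instance

-- ===== CLAIM (what is proved, stated in full; the proofs are below) =====
def Claim_equal_distribute_rows_py : Prop := ∀ (n : Int) (n_rows : Int), Dom_distribute_rows_py n n_rows → Pre_distribute_rows_py n n_rows → Spec_distribute_rows_py n n_rows (distribute_rows_py n n_rows)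

-- ===== LEMMAS AND PROOFS =====

-- number of single-step corrections row j (0-based from the left, L rows, N total steps) receives
def pvCnt (L N j : Nat) : Int :=
  ((N / L : Nat) : Int) + (if (L:Int) - 1 - (j:Int) < ((N % L : Nat) : Int) then 1 else 0)

lemma pvCnt_succ (L N j : Nat) (h1 : 0 < L) (hj : j < L) :
    pvCnt L (N+1) j = pvCnt L N j + (if j = L - 1 - N % L then 1 else 0) := by
  have hr : N % L < L := Nat.mod_lt _ h1
  have hqr : L * (N / L) + N % L = N := Nat.div_add_mod N L
  by_cases hc : N % L + 1 = L
  · have hdiv : (N+1)/L = N/L + 1 := by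
      have h2 : N + 1 = L * (N / L + 1) := by rw [Nat.mul_succ]; omega
      rw [h2, Nat.mul_div_cancel_left _ h1]
    have hmod : (N+1)%L = 0 := by
      have h2 : N + 1 = L * (N / L + 1) := by rw [Nat.mul_succ]; omega
      rw [h2]; exact Nat.mul_mod_right _ _
    unfold pvCnt
    rw [hdiv, hmod]
    push_cast
    split_ifs <;> omega
  · have hlt : N % L + 1 < L := by omega
    have h2 : N + 1 = L * (N / L) + (N % L + 1) := by omega
    have hdiv : (N+1)/L = N/L := by
      rw [h2, Nat.mul_add_div h1, Nat.div_eq_of_lt hlt]; omega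
    have hmod : (N+1)%L = N % L + 1 := by
      rw [h2, Nat.mul_add_mod]; exact Nat.mod_eq_of_lt hlt
    unfold pvCnt
    rw [hdiv, hmod]
    push_cast
    split_ifs <;> omega

-- counts[-k] = v for 0 < k ≤ len, written through PySem's Python-index normalisation
lemma pvSetD_neg (xs : List Int) (k : Nat) (v : Int) (h0 : 0 < k) (h1 : k ≤ xs.length) :
    PySem.List.pySetD xs (-(k:Int)) v = xs.set (xs.length - k) v := by
  simp [PySem.List.pySetD, PySem.List.pySet?, PySem.List.pyIdx?, h1, h0.ne']

-- A's correction loop, characterised elementwise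
lemma pvLoop (L : Nat) (h1 : 0 < L) (v : Int) (N : Nat) (C : List Int) (hC : C.length = L) :
    List.foldl
      (fun (c : List Int) (i : Nat) =>
        PySem.List.pySetD c (-(PySem.Int.mod (i:Int) (L:Int)) - 1)
          (PySem.List.pyGetD c (-(PySem.Int.mod (i:Int) (L:Int)) - 1) 0 + v)) C (List.range N)
    = C.mapIdx (fun j x => x + pvCnt L N j * v) := by
  induction N with
  | zero =>
    apply List.ext_getElem
    · simp
    · intro j hj hj2
      have hjL : j < L := by simpa [hC] using hj
      simp only [List.range_zero, List.foldl_nil, List.getElem_mapIdx]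
      have hz : pvCnt L 0 j = 0 := by
        unfold pvCnt
        simp only [Nat.zero_div, Nat.zero_mod, Nat.cast_zero]
        rw [if_neg (by omega)]; ring
      rw [hz]; ring
  | succ N ih =>
    rw [List.range_succ, List.foldl_append, ih]
    simp only [List.foldl_cons, List.foldl_nil]
    have hmod : PySem.Int.mod ((N:Nat):Int) ((L:Nat):Int) = ((N % L : Nat) : Int) :=
      PySem.Int.mod_natCast N L
    have hrL : N % L < L := Nat.mod_lt _ h1
    have hidx : -(((N % L : Nat) : Int)) - 1 = -(((N % L + 1 : Nat)) : Int) := by push_cast; ring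
    have hlen : (C.mapIdx fun j x => x + pvCnt L N j * v).length = L := by simp [hC]
    rw [hmod, hidx,
      pvSetD_neg _ _ _ (by omega) (by rw [hlen]; omega),
      PySem.List.pyGetD_neg_natCast _ _ _ (by omega) (by rw [hlen]; omega)]
    apply List.ext_getElem
    · simp [hC]
    · intro j hj hj2
      have hjL : j < L := by simpa [hC] using hj2
      have hcnt := pvCnt_succ L N j h1 hjL
      rw [List.getElem_set]
      simp only [List.length_mapIdx, hC, List.getElem_mapIdx]
      by_cases h : L - (N % L + 1) = j
      · rw [if_pos h]
        simp only [h]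
        rw [hcnt, if_pos (by omega : j = L - 1 - N % L)]
        ring
      · rw [if_neg h]
        rw [hcnt, if_neg (by omega : ¬ j = L - 1 - N % L)]
        ring

-- B's enumerate comprehension, as mapIdx
lemma pvZip (C : List Int) (L N : Nat) (v : Int) :
    (PySem.List.enumerate C 0).map (fun jc => jc.2 +
        (((N / L : Nat) : Int) + (if (L:Int) - 1 - jc.1 < ((N % L : Nat) : Int) then 1 else 0)) * v)
    = C.mapIdx (fun j x => x + pvCnt L N j * v) := by
  apply List.ext_getElem
  · simp [PySem.List.length_enumerate]
  · intro j hj hj2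
    simp [PySem.List.getElem_enumerate, pvCnt]

-- Gauss: sum of the weight list
lemma pvGauss (m : Nat) :
    2 * (List.map (fun k : Nat => ((0:Int) + (k:Int)) + 1) (List.range m)).sum = (m:Int) * ((m:Int) + 1) := by
  induction m with
  | zero => simp
  | succ m ih =>
    rw [List.range_succ, List.map_append, List.sum_append]
    simp only [List.map_cons, List.map_nil, List.sum_cons, List.sum_nil]
    rw [Nat.cast_add, Nat.cast_one]
    linear_combination ih

-- ===== VERDICT (by name: the statement is the Claim_ definition above) =====
theorem distribute_rows_py_spec : Claim_equal_distribute_rows_py := by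
  intro n n_rows hDom hPre
  unfold Spec_distribute_rows_py
  unfold Pre_distribute_rows_py at hPre
  have hn0 : (0:Int) ≤ n_rows := by omega
  have hn : ((n_rows.toNat : Nat) : Int) = n_rows := Int.toNat_of_nonneg hn0
  have hL1 : 0 < n_rows.toNat := by omega
  simp only [distribute_rows_py, distribute_rows_py_alt]
  have hw : (PySem.List.pyRange 0 n_rows 1).map (fun i => i + 1) = PySem.List.pyRange 1 (n_rows+1) 1 := by
    rw [PySem.List.pyRange_one 0 n_rows, PySem.List.pyRange_one 1 (n_rows+1), List.map_map]
    norm_num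
    intro a _
    ring
  have htot : ((PySem.List.pyRange 0 n_rows 1).map (fun i => i + 1)).sum
      = PySem.Int.floordiv (n_rows * (n_rows + 1)) 2 := by
    rw [PySem.List.pyRange_one 0 n_rows, List.map_map]
    have hg := pvGauss (n_rows - 0).toNat
    have hc : (((n_rows - 0).toNat : Nat) : Int) = n_rows := by
      rw [sub_zero]; omega
    rw [hc] at hg
    rw [PySem.Int.floordiv_eq_ediv_of_pos (by norm_num)]
    have hcomp : ((fun i : Int => i + 1) ∘ (fun k : Nat => (0:Int) + (k:Int)))
        = (fun k : Nat => ((0:Int) + (k:Int)) + 1) := by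
      funext k; simp [Function.comp]
    rw [hcomp]
    generalize hA : n_rows * (n_rows + 1) = A at hg ⊢
    omega
  rw [htot, hw]
  set C : List Int := List.map (fun w => max 1 (pvPyRound w (PySem.Int.floordiv (n_rows * (n_rows + 1)) 2) n)) (PySem.List.pyRange 1 (n_rows + 1) 1) with hCdef
  have hClen : C.length = n_rows.toNat := by
    rw [hCdef, List.length_map, PySem.List.length_pyRange_one]
    norm_num
  set d : Int := n - C.sum with hd
  set v : Int := if d > 0 then 1 else -1 with hv
  have habs : |d| = ((d.natAbs : Nat) : Int) := Int.abs_eq_natAbs d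
  rw [habs, ← hn]
  simp only [PySem.List.pyRange_zero_natCast, List.foldl_map]
  rw [pvLoop n_rows.toNat hL1 v d.natAbs C hClen]
  rw [PySem.Int.floordiv_natCast, PySem.Int.mod_natCast]
  exact (pvZip C n_rows.toNat d.natAbs v).symm
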